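-- pv_equiv track=rewrite | github.com/xdroppar/formulate-landing | tools/add_inline_links.py | is_protected_context
-- ===== SOURCE A (Python) =====
-- def is_protected_context(src: str, match_start: int, match_end: int) -> bool:
--     """Return True if the match is inside a context where we shouldn't add a link.
--
--     Uses a 400-char lookback for local tag-scope checks (anchor/heading/
--     comment) and a full-file backward scan for JSX expression/string state —
--     the 400-char window was too narrow for multi-entry `takeaways={[...]}`
--     arrays, which could put the enclosing `{` well beyond 400 chars back.
--     """
--     # 400-char window for nearby tag context (anchors, headings, comments).
--     nearby = src[max(0, match_start - 400):match_start]
--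
--     # Already inside an anchor — either a plain <a> or a custom <IngredientLink>
--     # (they both produce anchor tags; wrapping their content creates nested
--     # anchors which React rejects and browsers render unpredictably).
--     for open_tag, close_tag in (
--         ("<a ", "</a>"),
--         ("<IngredientLink", "</IngredientLink>"),
--     ):
--         last_open = nearby.rfind(open_tag)
--         last_close = nearby.rfind(close_tag)
--         if last_open > last_close:
--             return True
--
--     # Inside a heading tag
--     for tag in ("<h1", "<h2", "<h3"):
--         last_open = nearby.rfind(tag)
--         if last_open == -1:
--             continue
--         close_tag = "</" + tag[1:3] + ">"
--         last_close = nearby.rfind(close_tag)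
--         if last_open > last_close:
--             return True
--
--     # Inside a JSX attribute value — check if we're between `="` and its close.
--     # Local scope is fine here because attributes don't span large distances.
--     last_gt = nearby.rfind(">")
--     attr_region = nearby[last_gt + 1:] if last_gt >= 0 else nearby
--     if attr_region.count('"') % 2 == 1:
--         return True
--
--     # Inside a JSX comment
--     last_comment_open = nearby.rfind("{/*")
--     last_comment_close = nearby.rfind("*/}")
--     if last_comment_open > last_comment_close:
--         return True
--
--     # JSX-expression-block string check — must use FULL file backward scan.
--     # The innermost unclosed `{` can be thousands of chars back for things like
--     # `takeaways={[...]}` arrays with multiple long entries. A 400-char window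
--     # misses it and counts an even number of prior string-boundary quotes,
--     # giving a false-negative and wrapping text inside a string literal with
--     # literal `<a>` tags.
--     before_full = src[:match_start]
--     depth = 0
--     last_brace = -1
--     for i in range(len(before_full) - 1, -1, -1):
--         c = before_full[i]
--         if c == "}":
--             depth += 1
--         elif c == "{":
--             if depth == 0:
--                 last_brace = i
--                 break
--             depth -= 1
--     if last_brace >= 0:
--         brace_region = before_full[last_brace:]
--         # Odd number of unescaped double quotes after the opening `{` means
--         # we're inside an open string literal within a JSX expression.
--         if brace_region.count('"') % 2 == 1:
--             return True
--
--     return False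
-- ===== SOURCE B (Python) =====
-- def is_protected_context(src: str, match_start: int, match_end: int) -> bool:
--     nearby = src[max(0, match_start - 400):match_start]
--
--     # One table of (open, close) marker pairs covers anchors, headings and the
--     # JSX comment alike: protected when the last open marker follows the last
--     # close marker (rfind gives -1 when absent, so a missing open never wins).
--     pairs = [
--         ("<a ", "</a>"),
--         ("<IngredientLink", "</IngredientLink>"),
--         ("<h1", "</h1>"),
--         ("<h2", "</h2>"),
--         ("<h3", "</h3>"),
--         ("{/*", "*/}"),
--     ]
--     if any(nearby.rfind(o) > nearby.rfind(c) for o, c in pairs):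
--         return True
--
--     # Unclosed attribute value after the last '>'.
--     last_gt = nearby.rfind(">")
--     attr_region = nearby[last_gt + 1:] if last_gt >= 0 else nearby
--     if attr_region.count('"') % 2 == 1:
--         return True
--
--     # Innermost unmatched '{' before the match, found with one forward pass
--     # and an index stack (a surplus '}' on an empty stack is a no-op).
--     before_full = src[:match_start]
--     stack = []
--     for i, ch in enumerate(before_full):
--         if ch == "{":
--             stack.append(i)
--         elif ch == "}" and stack:
--             stack.pop()
--     if stack and before_full[stack[-1]:].count('"') % 2 == 1:
--         return True
--
--     return False
-- ===== Notes on version B (the rewrite author's own statement) =====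
-- stated objective: alternative
-- what changed: The per-tag check sequence (anchors, headings, JSX comment) is collapsed into one table of open/close marker pairs tested with a single any(), and the full-file backward depth-counting brace scan is replaced by a single forward pass that maintains a stack of '{' indices (popping on '}', ignoring surplus closers) whose top is the innermost unmatched brace.
import Mathlib
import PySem

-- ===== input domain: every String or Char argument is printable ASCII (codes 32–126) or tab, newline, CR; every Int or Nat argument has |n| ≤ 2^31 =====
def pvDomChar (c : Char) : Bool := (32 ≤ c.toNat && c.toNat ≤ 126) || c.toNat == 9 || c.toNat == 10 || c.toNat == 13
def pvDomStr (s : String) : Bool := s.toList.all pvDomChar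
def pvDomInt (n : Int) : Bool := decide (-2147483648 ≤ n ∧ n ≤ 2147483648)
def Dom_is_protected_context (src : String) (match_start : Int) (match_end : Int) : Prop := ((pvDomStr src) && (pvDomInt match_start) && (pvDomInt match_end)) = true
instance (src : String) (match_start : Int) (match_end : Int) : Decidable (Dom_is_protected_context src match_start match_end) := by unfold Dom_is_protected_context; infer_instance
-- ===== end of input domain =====

-- B replaces A's sequence of per-tag checks by one table of marker pairs and A's
-- backward depth-counting brace scan by a single forward pass with an index stack
-- (objective: alternative decomposition, same cost).

-- ===== PORT A =====
-- for (open_tag, close_tag) in (...): if rfind(open) > rfind(close): return True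
def aAnchorLoop (nearby : String) : List (String × String) → Bool
  | [] => false
  | (o, cl) :: rest =>
    if PySem.Str.rfind nearby o > PySem.Str.rfind nearby cl then true
    else aAnchorLoop nearby rest

-- for tag in (...): last_open = rfind(tag); if -1: continue; close = "</"+tag[1:3]+">" …
def aHeadingLoop (nearby : String) : List String → Bool
  | [] => false
  | tag :: rest =>
    let last_open := PySem.Str.rfind nearby tag
    if last_open = -1 then aHeadingLoop nearby rest
    else
      let close_tag := "</" ++ PySem.Str.slice tag (some 1) (some 3) ++ ">"
      let last_close := PySem.Str.rfind nearby close_tag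
      if last_open > last_close then true
      else aHeadingLoop nearby rest

-- the backward 'for i in range(len(before_full)-1, -1, -1)' loop: we walk the
-- reversed character list carrying the current index i (counting down) and depth
def aBraceScan : List Char → Int → Int → Int
  | [], _, _ => -1
  | c :: rest, depth, i =>
    if c = '}' then aBraceScan rest (depth + 1) (i - 1)
    else if c = '{' then
      if depth = 0 then i else aBraceScan rest (depth - 1) (i - 1)
    else aBraceScan rest depth (i - 1)

def is_protected_context (src : String) (match_start : Int) (match_end : Int) : Bool :=
  let nearby := PySem.Str.slice src (some (max 0 (match_start - 400))) (some match_start)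
  if aAnchorLoop nearby [("<a ", "</a>"), ("<IngredientLink", "</IngredientLink>")] then true
  else if aHeadingLoop nearby ["<h1", "<h2", "<h3"] then true
  else
    let last_gt := PySem.Str.rfind nearby ">"
    let attr_region := if last_gt ≥ 0 then PySem.Str.slice nearby (some (last_gt + 1)) none else nearby
    if PySem.Str.count attr_region "\"" % 2 = 1 then true
    else if PySem.Str.rfind nearby "{/*" > PySem.Str.rfind nearby "*/}" then true
    else
      let before_full := PySem.Str.slice src none (some match_start)
      let last_brace := aBraceScan before_full.toList.reverse 0 ((before_full.toList.length : Int) - 1)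
      if last_brace ≥ 0 then
        let brace_region := PySem.Str.slice before_full (some last_brace) none
        if PySem.Str.count brace_region "\"" % 2 = 1 then true else false
      else false

-- ===== PORT B =====
def bPairs : List (String × String) :=
  [("<a ", "</a>"), ("<IngredientLink", "</IngredientLink>"),
   ("<h1", "</h1>"), ("<h2", "</h2>"), ("<h3", "</h3>"), ("{/*", "*/}")]

-- one step of the forward pass: push the index of '{', pop on '}' when nonempty
def bBraceStep (st : List Int) (ic : Int × Char) : List Int :=
  if ic.2 = '{' then st ++ [ic.1]
  else if ic.2 = '}' ∧ st ≠ [] then st.dropLast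
  else st

def is_protected_context_alt (src : String) (match_start : Int) (match_end : Int) : Bool :=
  let nearby := PySem.Str.slice src (some (max 0 (match_start - 400))) (some match_start)
  if bPairs.any (fun p => PySem.Str.rfind nearby p.1 > PySem.Str.rfind nearby p.2) then true
  else
    let last_gt := PySem.Str.rfind nearby ">"
    let attr_region := if last_gt ≥ 0 then PySem.Str.slice nearby (some (last_gt + 1)) none else nearby
    if PySem.Str.count attr_region "\"" % 2 = 1 then true
    else
      let before_full := PySem.Str.slice src none (some match_start)
      let stack := (PySem.List.enumerate before_full.toList).foldl bBraceStep []
      match stack.getLast? with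
      | none => false
      | some top =>
        if PySem.Str.count (PySem.Str.slice before_full (some top) none) "\"" % 2 = 1 then true
        else false

-- ===== PRECONDITION & SPEC =====
def Spec_is_protected_context (src : String) (match_start : Int) (match_end : Int) (out : Bool) : Prop := out = is_protected_context_alt src match_start match_end
instance (src : String) (match_start : Int) (match_end : Int) (out : Bool) : Decidable (Spec_is_protected_context src match_start match_end out) := by unfold Spec_is_protected_context; infer_instance

-- ===== CLAIM (what is proved, stated in full; the proofs are below) =====
def Claim_equal_is_protected_context : Prop := ∀ (src : String) (match_start : Int) (match_end : Int), Dom_is_protected_context src match_start match_end → Spec_is_protected_context src match_start match_end (is_protected_context src match_start match_end)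

-- ===== LEMMAS AND PROOFS =====

theorem rfind_ge (s sub : String) : -1 ≤ PySem.Str.rfind s sub := by
  simp only [PySem.Str.rfind_eq]
  unfold PySem.Chars.rfind
  generalize s.toList.length = n
  induction n with
  | zero => unfold PySem.Chars.rfind.go; split <;> simp
  | succ j ih => unfold PySem.Chars.rfind.go; split; · simp; omega
                 · exact ih

theorem enumerate_append {α : Type} (xs ys : List α) (s : Int) :
    PySem.List.enumerate (xs ++ ys) s
      = PySem.List.enumerate xs s ++ PySem.List.enumerate ys (s + xs.length) := by
  induction xs generalizing s with
  | nil => simp [PySem.List.enumerate]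
  | cons x xs ih => simp [PySem.List.enumerate, ih]; ring_nf

theorem enumerate_fst_le {α : Type} (xs : List α) (s : Int) :
    ∀ p ∈ PySem.List.enumerate xs s, s ≤ p.1 := by
  induction xs generalizing s with
  | nil => simp [PySem.List.enumerate]
  | cons x xs ih =>
    intro p hp
    simp only [PySem.List.enumerate, List.mem_cons] at hp
    rcases hp with h | h
    · simp [h]
    · have := ih (s + 1) p h; omega

theorem stack_nonneg (ps : List (Int × Char)) (st : List Int)
    (h0 : ∀ x ∈ st, 0 ≤ x) (hp : ∀ p ∈ ps, 0 ≤ p.1) :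
    ∀ x ∈ ps.foldl bBraceStep st, 0 ≤ x := by
  induction ps generalizing st with
  | nil => simpa using h0
  | cons p ps ih =>
    intro x hx
    refine ih (bBraceStep st p) ?_ (fun q hq => hp q (by simp [hq])) x (by simpa using hx)
    intro y hy
    unfold bBraceStep at hy
    split_ifs at hy with h1 h2
    · rcases List.mem_append.mp hy with h | h
      · exact h0 y h
      · simp at h; subst h; exact hp p (by simp)
    · exact h0 y ((List.dropLast_sublist (l := st)).subset hy)
    · exact h0 y hy

-- the heart of the file: A's backward depth-counting scan at depth d returns the
-- d-th element from the top of B's forward index stack (or -1 when there is none)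
theorem braceScan_eq (l : List Char) (d : Nat) :
    aBraceScan l.reverse (d : Int) ((l.length : Int) - 1)
      = ((((PySem.List.enumerate l).foldl bBraceStep []).reverse)[d]?).getD (-1) := by
  induction l using List.reverseRecOn generalizing d with
  | nil => simp [aBraceScan, PySem.List.enumerate]
  | append_singleton xs c ih =>
    rw [show PySem.List.enumerate (xs ++ [c]) = PySem.List.enumerate (xs ++ [c]) 0 from rfl,
        enumerate_append, List.foldl_append]
    have hen : PySem.List.enumerate [c] ((0 : Int) + xs.length) = [((xs.length : Int), c)] := by
      simp [PySem.List.enumerate]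
    rw [hen]
    set st := (PySem.List.enumerate xs 0).foldl bBraceStep [] with hst
    have hlen : ((xs ++ [c]).length : Int) - 1 = (xs.length : Int) := by simp
    rw [List.reverse_append, hlen]
    simp only [List.reverse_singleton, List.singleton_append, List.foldl_cons, List.foldl_nil]
    show aBraceScan (c :: xs.reverse) (d : Int) (xs.length : Int) = _
    unfold aBraceScan bBraceStep
    by_cases hc1 : c = '}'
    · subst hc1
      rw [if_pos rfl]
      have hcast : ((d : Int) + 1) = ((d + 1 : Nat) : Int) := by push_cast; ring
      rw [hcast, ih (d + 1)]
      rw [if_neg (show ¬ (('}' : Char) = '{') by decide)]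
      by_cases hst0 : st = []
      · rw [if_neg (by simp [hst0])]
        simp [hst0]
      · rw [if_pos ⟨rfl, hst0⟩, ← List.tail_reverse, List.getElem?_tail]
    · by_cases hc2 : c = '{'
      · subst hc2
        rw [if_neg hc1, if_pos rfl, if_pos rfl]
        cases d with
        | zero => simp
        | succ k =>
          rw [if_neg (show ¬ (((k + 1 : Nat) : Int) = 0) by push_cast; omega)]
          have hcast : ((k + 1 : Nat) : Int) - 1 = ((k : Nat) : Int) := by push_cast; ring
          rw [hcast, ih k]
          simp
      · rw [if_neg hc1, if_neg hc2, ih d, if_neg hc2, if_neg (fun h => hc1 h.1)]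

-- fused form used in the final assembly: A's found index is B's stack top (or -1)
theorem braceScan_top (l : List Char) :
    aBraceScan l.reverse 0 ((l.length : Int) - 1)
      = (((PySem.List.enumerate l).foldl bBraceStep []).getLast?).getD (-1) := by
  have := braceScan_eq l 0
  rwa [← List.head?_eq_getElem?, List.head?_reverse] at this

-- unfolding A's per-tag loops into plain disjunctions of rfind comparisons
theorem if_true_or (p : Prop) [Decidable p] (b : Bool) :
    (if p then true else b) = (decide p || b) := by
  by_cases h : p <;> simp [h]

theorem headStep_eq (n tag ct : String) (rest : Bool) :
    (if PySem.Str.rfind n tag = -1 then rest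
     else if PySem.Str.rfind n tag > PySem.Str.rfind n ct then true else rest)
      = (decide (PySem.Str.rfind n tag > PySem.Str.rfind n ct) || rest) := by
  by_cases hm : PySem.Str.rfind n tag = -1
  · rw [if_pos hm, hm]
    have h2 := rfind_ge n ct
    have hd : decide (PySem.Str.rfind n tag > PySem.Str.rfind n ct) = false := by
      rw [hm]; exact decide_eq_false (by omega)
    rw [← hm, hd, Bool.false_or]
  · rw [if_neg hm, if_true_or]

theorem anchorLoop_nil (n : String) : aAnchorLoop n [] = false := rfl

theorem headingLoop_nil (n : String) : aHeadingLoop n [] = false := rfl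

theorem anchorLoop_cons (n o c : String) (rest : List (String × String)) :
    aAnchorLoop n ((o, c) :: rest)
      = (decide (PySem.Str.rfind n o > PySem.Str.rfind n c) || aAnchorLoop n rest) := by
  simp only [aAnchorLoop]
  rw [if_true_or]

theorem headingLoop_cons (n tag : String) (rest : List String) :
    aHeadingLoop n (tag :: rest)
      = (decide (PySem.Str.rfind n tag >
            PySem.Str.rfind n ("</" ++ PySem.Str.slice tag (some 1) (some 3) ++ ">")) ||
         aHeadingLoop n rest) := by
  simp only [aHeadingLoop]
  exact headStep_eq n tag _ _

-- A's whole brace block equals B's whole brace block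
theorem brace_eq (bf : String) :
    (if aBraceScan bf.toList.reverse 0 ((bf.toList.length : Int) - 1) ≥ 0 then
       (if PySem.Str.count (PySem.Str.slice bf
             (some (aBraceScan bf.toList.reverse 0 ((bf.toList.length : Int) - 1))) none) "\"" % 2 = 1
        then true else false)
     else false)
    = (match ((PySem.List.enumerate bf.toList).foldl bBraceStep []).getLast? with
       | none => false
       | some top =>
         if PySem.Str.count (PySem.Str.slice bf (some top) none) "\"" % 2 = 1 then true
         else false) := by
  have hs := braceScan_top bf.toList
  cases hL : ((PySem.List.enumerate bf.toList).foldl bBraceStep []).getLast? with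
  | none =>
    rw [hL] at hs
    simp only [Option.getD_none] at hs
    rw [hs, if_neg (by omega)]
  | some top =>
    rw [hL] at hs
    simp only [Option.getD_some] at hs
    have hmem : top ∈ (PySem.List.enumerate bf.toList).foldl bBraceStep [] :=
      List.mem_of_getLast? hL
    have htop : 0 ≤ top :=
      stack_nonneg _ [] (by simp) (fun p hp => enumerate_fst_le bf.toList 0 p hp) top hmem
    rw [hs, if_pos (by omega)]

-- ===== VERDICT (by name: the statement is the Claim_ definition above) =====
set_option maxHeartbeats 2000000 in
theorem is_protected_context_spec : Claim_equal_is_protected_context := by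
  intro src match_start match_end _
  unfold Spec_is_protected_context
  unfold is_protected_context is_protected_context_alt
  set nearby := PySem.Str.slice src (some (max 0 (match_start - 400))) (some match_start) with hnear
  set before_full := PySem.Str.slice src none (some match_start) with hbef
  have e1 : ("</" ++ PySem.Str.slice "<h1" (some 1) (some 3) ++ ">") = "</h1>" := by decide
  have e2 : ("</" ++ PySem.Str.slice "<h2" (some 1) (some 3) ++ ">") = "</h2>" := by decide
  have e3 : ("</" ++ PySem.Str.slice "<h3" (some 1) (some 3) ++ ">") = "</h3>" := by decide
  simp only [anchorLoop_cons, headingLoop_cons, anchorLoop_nil, headingLoop_nil, bPairs,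
    List.any_cons, List.any_nil, e1, e2, e3, Bool.or_false, brace_eq before_full]
  simp only [Bool.or_eq_true, decide_eq_true_eq]
  by_cases p1 : PySem.Str.rfind nearby "<a " > PySem.Str.rfind nearby "</a>" <;>
    by_cases p2 : PySem.Str.rfind nearby "<IngredientLink" > PySem.Str.rfind nearby "</IngredientLink>" <;>
    by_cases p3 : PySem.Str.rfind nearby "<h1" > PySem.Str.rfind nearby "</h1>" <;>
    by_cases p4 : PySem.Str.rfind nearby "<h2" > PySem.Str.rfind nearby "</h2>" <;>
    by_cases p5 : PySem.Str.rfind nearby "<h3" > PySem.Str.rfind nearby "</h3>" <;>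
    by_cases p6 : PySem.Str.rfind nearby "{/*" > PySem.Str.rfind nearby "*/}" <;>
    simp only [p1, p2, p3, p4, p5, p6, or_true, or_false, if_true, if_false, ite_self]
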